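-- pv_equiv track=rewrite | github.com/lukkspereiraa/trabalho-de-CAA-levenshtein | main.py | sugerir_correcoes_otimizado
-- ===== SOURCE A (Python) =====
-- def levenshtein_optimized(s1, s2):
--     m, n = len(s1), len(s2)
--     if m < n:
--         s1, s2 = s2, s1
--         m, n = n, m  # Garantir que s1 seja a maior string
--
--     previous = list(range(n + 1))  # Armazena a linha anterior
--     current = [0] * (n + 1)  # Armazena a linha atual
--
--     for i in range(1, m + 1):
--         current[0] = i
--         for j in range(1, n + 1):
--             cost = 0 if s1[i - 1] == s2[j - 1] else 1
--             current[j] = min(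
--                 current[j - 1] + 1,    # Inserção
--                 previous[j] + 1,       # Remoção
--                 previous[j - 1] + cost # Substituição
--             )
--         previous, current = current, previous  # Alterna as linhas
--
--     return previous[n]
--
-- def sugerir_correcoes_otimizado(palavra, dicionario, limite=2, minimo_sugestoes=5):
--     tam_palavra = len(palavra)
--     candidatos = [termo for termo in dicionario if abs(len(termo) - tam_palavra) <= limite]
--
--     sugestoes = []
--     for termo in candidatos:
--         dist = levenshtein_optimized(palavra, termo)
--         if dist <= limite:
--             sugestoes.append((termo, dist))
--
--     sugestoes.sort(key=lambda x: x[1])  # Ordena por menor distância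
--
--     if len(sugestoes) < minimo_sugestoes:
--         extras = sorted(
--             [(termo, levenshtein_optimized(palavra, termo)) for termo in dicionario], key=lambda x: x[1]
--         )
--         sugestoes.extend(extras[:minimo_sugestoes - len(sugestoes)])
--
--     return [s[0] for s in sugestoes[:minimo_sugestoes]]
-- ===== SOURCE B (Python) =====
-- def levenshtein_optimized(s1, s2):
--     m, n = len(s1), len(s2)
--     if m < n:
--         s1, s2 = s2, s1
--         m, n = n, m
--
--     previous = list(range(n + 1))
--     current = [0] * (n + 1)
--
--     for i in range(1, m + 1):
--         current[0] = i
--         for j in range(1, n + 1):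
--             cost = 0 if s1[i - 1] == s2[j - 1] else 1
--             current[j] = min(current[j - 1] + 1, previous[j] + 1, previous[j - 1] + cost)
--         previous, current = current, previous
--
--     return previous[n]
--
-- def sugerir_correcoes_otimizado(palavra, dicionario, limite=2, minimo_sugestoes=5):
--     # Score every term ONCE, sort ONCE; the within-limit suggestions are a filter
--     # of that single ranking, and the fallback fill reuses the same ranking.
--     ranked = sorted(((termo, levenshtein_optimized(palavra, termo)) for termo in dicionario),
--                     key=lambda x: x[1])
--     sugestoes = [termo for termo, dist in ranked if dist <= limite]
--     if len(sugestoes) >= minimo_sugestoes: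
--         return sugestoes[:minimo_sugestoes]
--     return sugestoes + [termo for termo, _ in ranked[:minimo_sugestoes - len(sugestoes)]]
-- ===== Notes on version B (the rewrite author's own statement) =====
-- stated objective: simpler
-- what changed: B scores and sorts the whole dictionary exactly once and derives both the within-limit suggestions (a filter of that single ranking, valid because the Levenshtein distance dominates the length difference, making A's length pre-filter redundant) and the fallback fill (a slice of the same ranking) from it, replacing A's length-prefilter pass, conditional-append scoring loop and two separate sorts, the second of which rescored every dictionary word.
import Mathlib
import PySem

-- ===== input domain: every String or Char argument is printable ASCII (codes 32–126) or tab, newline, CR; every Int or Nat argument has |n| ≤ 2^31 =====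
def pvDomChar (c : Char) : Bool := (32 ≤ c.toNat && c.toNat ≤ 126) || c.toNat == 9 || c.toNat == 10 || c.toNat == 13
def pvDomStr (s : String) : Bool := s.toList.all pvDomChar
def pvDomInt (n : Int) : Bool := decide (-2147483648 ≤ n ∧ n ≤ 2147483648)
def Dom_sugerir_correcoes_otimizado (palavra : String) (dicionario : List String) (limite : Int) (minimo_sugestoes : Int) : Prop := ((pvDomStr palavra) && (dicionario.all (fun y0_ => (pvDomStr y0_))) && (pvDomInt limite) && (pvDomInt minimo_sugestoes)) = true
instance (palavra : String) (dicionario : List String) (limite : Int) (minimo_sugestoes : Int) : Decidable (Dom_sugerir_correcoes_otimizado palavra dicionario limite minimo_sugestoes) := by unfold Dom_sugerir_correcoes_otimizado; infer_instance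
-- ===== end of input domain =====

-- B scores and sorts the whole dictionary once and derives both the within-limit
-- suggestions and the fallback fill from that single ranking (objective: simpler;
-- same asymptotic cost, no speed claim).

-- ===== PORT A =====
-- levenshtein_optimized (shared verbatim by the two Python files).
-- Inner 'for j' loop, building the new row left to right: 'left' is current[j-1]
-- (just written), 'diag' is previous[j-1], 'pj :: ps' walks previous[j], previous[j+1], …
def pvLevRow (c1 : Char) : Int → Int → List Char → List Int → List Int
  | _, _, [], _ => []
  | _, _, _ :: _, [] => []   -- unreachable: previous always has an entry per remaining s2 position
  | left, diag, c2 :: cs, pj :: ps =>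
    let cost : Int := if c1 = c2 then 0 else 1
    let cur := min (min (left + 1) (pj + 1)) (diag + cost)
    cur :: pvLevRow c1 cur pj cs ps

-- outer 'for i' loop; i is the 1-based row index, prev the previous row
def pvLevLoop (s2 : List Char) : List Char → Int → List Int → List Int
  | [], _, prev => prev
  | c1 :: rest, i, prev =>
    pvLevLoop s2 rest (i + 1) (i :: pvLevRow c1 i (prev.headD 0) s2 prev.tail)

def pvLev (s1 s2 : String) : Int :=
  let l1 := s1.toList
  let l2 := s2.toList
  let p := if l1.length < l2.length then (l2, l1) else (l1, l2)
  let fin := pvLevLoop p.2 p.1 1 (PySem.List.pyRange 0 ((p.2.length : Int) + 1))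
  (PySem.List.pyGet? fin (p.2.length : Int)).getD 0   -- previous[n]; the index is always in range

def sugerir_correcoes_otimizado (palavra : String) (dicionario : List String) (limite : Int) (minimo_sugestoes : Int) : List String :=
  let tam_palavra := PySem.Str.len palavra
  let candidatos := dicionario.filter (fun termo => decide (|PySem.Str.len termo - tam_palavra| ≤ limite))
  let sugestoes : List (String × Int) := candidatos.foldl (fun acc termo =>
      let dist := pvLev palavra termo
      if dist ≤ limite then acc ++ [(termo, dist)] else acc) []
  let sugestoes1 := PySem.List.sorted sugestoes (fun x => x.2)
  let sugestoes2 :=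
    if (sugestoes1.length : Int) < minimo_sugestoes then
      let extras := PySem.List.sorted (dicionario.map (fun termo => (termo, pvLev palavra termo))) (fun x => x.2)
      sugestoes1 ++ PySem.List.slice extras none (some (minimo_sugestoes - (sugestoes1.length : Int)))
    else sugestoes1
  (PySem.List.slice sugestoes2 none (some minimo_sugestoes)).map (fun s => s.1)

-- ===== PORT B =====
def sugerir_correcoes_otimizado_alt (palavra : String) (dicionario : List String) (limite : Int) (minimo_sugestoes : Int) : List String :=
  let ranked := PySem.List.sorted (dicionario.map (fun termo => (termo, pvLev palavra termo))) (fun x => x.2)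
  let sugestoes := (ranked.filter (fun x => decide (x.2 ≤ limite))).map (fun x => x.1)
  if minimo_sugestoes ≤ (sugestoes.length : Int) then
    PySem.List.slice sugestoes none (some minimo_sugestoes)
  else
    sugestoes ++ (PySem.List.slice ranked none (some (minimo_sugestoes - (sugestoes.length : Int)))).map (fun x => x.1)

-- ===== PRECONDITION & SPEC =====
def Spec_sugerir_correcoes_otimizado (palavra : String) (dicionario : List String) (limite : Int) (minimo_sugestoes : Int) (out : List String) : Prop := out = sugerir_correcoes_otimizado_alt palavra dicionario limite minimo_sugestoes
instance (palavra : String) (dicionario : List String) (limite : Int) (minimo_sugestoes : Int) (out : List String) : Decidable (Spec_sugerir_correcoes_otimizado palavra dicionario limite minimo_sugestoes out) := by unfold Spec_sugerir_correcoes_otimizado; infer_instance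

-- ===== CLAIM (what is proved, stated in full; the proofs are below) =====
def Claim_equal_sugerir_correcoes_otimizado : Prop := ∀ (palavra : String) (dicionario : List String) (limite : Int) (minimo_sugestoes : Int), Dom_sugerir_correcoes_otimizado palavra dicionario limite minimo_sugestoes → Spec_sugerir_correcoes_otimizado palavra dicionario limite minimo_sugestoes (sugerir_correcoes_otimizado palavra dicionario limite minimo_sugestoes)

-- ===== LEMMAS AND PROOFS =====

theorem pvLevRow_length (c1 : Char) (cs : List Char) : ∀ (ps : List Int) (left diag : Int),
    (pvLevRow c1 left diag cs ps).length = min cs.length ps.length := by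
  induction cs with
  | nil => intro ps left diag; cases ps <;> simp [pvLevRow]
  | cons c2 cs ih =>
    intro ps left diag
    cases ps with
    | nil => simp [pvLevRow]
    | cons pj ps => simp [pvLevRow, ih]

-- invariant of the inner loop: row entries dominate (row index) - (column index)
theorem pvLevRow_ge (c1 : Char) (cs : List Char) :
    ∀ (ps : List Int) (left diag i j0 : Int),
    (∀ (k : Nat) (h : k < ps.length), i - 1 - (j0 + 1 + k) ≤ ps[k]) →
    i - 1 - j0 ≤ diag → i - j0 ≤ left →
    ∀ (k : Nat) (h : k < (pvLevRow c1 left diag cs ps).length),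
      i - (j0 + 1 + k) ≤ (pvLevRow c1 left diag cs ps)[k] := by
  induction cs with
  | nil => intro ps left diag i j0 _ _ _ k h; simp [pvLevRow] at h
  | cons c2 cs ih =>
    intro ps left diag i j0 hp hd hl k h
    cases ps with
    | nil => simp [pvLevRow] at h
    | cons pj ps =>
      have hpj : i - 1 - (j0 + 1) ≤ pj := by
        have := hp 0 (by simp); simpa using this
      have hcur' : i - (j0 + 1) ≤ min (min (left + 1) (pj + 1)) (diag + (if c1 = c2 then (0:Int) else 1)) := by
        rw [le_min_iff, le_min_iff]
        split_ifs <;> omega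
      have hcons : pvLevRow c1 left diag (c2 :: cs) (pj :: ps)
          = (min (min (left + 1) (pj + 1)) (diag + (if c1 = c2 then (0:Int) else 1))) ::
            pvLevRow c1 (min (min (left + 1) (pj + 1)) (diag + (if c1 = c2 then (0:Int) else 1))) pj cs ps := rfl
      cases k with
      | zero =>
        simp only [hcons]
        simpa using hcur'
      | succ k =>
        have h' : k < (pvLevRow c1 (min (min (left + 1) (pj + 1)) (diag + (if c1 = c2 then (0:Int) else 1))) pj cs ps).length := by
          rw [pvLevRow_length] at h ⊢
          simp only [List.length_cons] at h
          omega
        have hps : ∀ (m : Nat) (hm : m < ps.length), i - 1 - ((j0 + 1) + 1 + m) ≤ ps[m] := by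
          intro m hm
          have h1 := hp (m + 1) (by simp only [List.length_cons]; omega)
          simp only [List.getElem_cons_succ] at h1
          push_cast at h1 ⊢
          omega
        have hrec := ih ps (min (min (left + 1) (pj + 1)) (diag + (if c1 = c2 then (0:Int) else 1))) pj i (j0 + 1)
          hps (by omega) hcur' k h'
        simp only [hcons]
        simp only [List.getElem_cons_succ]
        have harith : i - (j0 + 1 + ((k : Int) + 1)) = i - ((j0 + 1) + 1 + (k : Int)) := by ring
        push_cast
        rw [harith]
        exact hrec

theorem pvLevLoop_length (s2 : List Char) : ∀ (rest : List Char) (i : Int) (prev : List Int),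
    prev.length = s2.length + 1 → (pvLevLoop s2 rest i prev).length = s2.length + 1 := by
  intro rest
  induction rest with
  | nil => intro i prev h; simpa [pvLevLoop] using h
  | cons c1 rest ih =>
    intro i prev h
    simp only [pvLevLoop]
    apply ih
    simp [pvLevRow_length, List.length_tail, h]

-- invariant of the outer loop, specialised to what the final cell needs
theorem pvLevLoop_ge (s2 : List Char) : ∀ (rest : List Char) (i : Int) (prev : List Int),
    prev.length = s2.length + 1 →
    (∀ (k : Nat) (h : k < prev.length), i - 1 - k ≤ prev[k]) →
    ∀ (k : Nat) (h : k < (pvLevLoop s2 rest i prev).length),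
      i - 1 + rest.length - k ≤ (pvLevLoop s2 rest i prev)[k] := by
  intro rest
  induction rest with
  | nil => intro i prev _ hp k h; simp only [pvLevLoop] at h ⊢; simpa using hp k h
  | cons c1 rest ih =>
    intro i prev hlen hp k h
    cases prev with
    | nil => simp at hlen
    | cons p0 ps =>
      have hps : ps.length = s2.length := by simpa using hlen
      have hstep : pvLevLoop s2 (c1 :: rest) i (p0 :: ps)
          = pvLevLoop s2 rest (i + 1) (i :: pvLevRow c1 i p0 s2 ps) := by
        simp [pvLevLoop]
      have hrowlen : (i :: pvLevRow c1 i p0 s2 ps).length = s2.length + 1 := by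
        simp [pvLevRow_length, hps]
      have hrow : ∀ (m : Nat) (hm : m < (i :: pvLevRow c1 i p0 s2 ps).length),
          (i + 1) - 1 - m ≤ (i :: pvLevRow c1 i p0 s2 ps)[m] := by
        intro m hm
        cases m with
        | zero => simp
        | succ m =>
          have hm' : m < (pvLevRow c1 i p0 s2 ps).length := by
            simp only [List.length_cons] at hm; omega
          have hbase : ∀ (u : Nat) (hu : u < ps.length), i - 1 - (0 + 1 + u) ≤ ps[u] := by
            intro u hu
            have h1 := hp (u + 1) (by simp only [List.length_cons]; omega)
            simp only [List.getElem_cons_succ] at h1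
            push_cast at h1 ⊢
            omega
          have hd : i - 1 - 0 ≤ p0 := by
            have := hp 0 (by simp); simpa using this
          have := pvLevRow_ge c1 s2 ps i p0 i 0 hbase hd (by omega) m hm'
          simp only [List.getElem_cons_succ]
          push_cast at this ⊢
          omega
      have hfin := ih (i + 1) (i :: pvLevRow c1 i p0 s2 ps) hrowlen hrow k
        (by rw [← hstep]; exact h)
      simp only [hstep]
      have hlen2 : ((c1 :: rest).length : Int) = (rest.length : Int) + 1 := by
        simp only [List.length_cons]; push_cast; ring
      rw [hlen2]
      have harith : i - 1 + ((rest.length : Int) + 1) - k = (i + 1) - 1 + (rest.length : Int) - k := by ring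
      rw [harith]
      exact hfin

-- the DP value at the end of the loop dominates (long length) - (short length)
theorem pvLev_core_ge (a b : List Char) :
    (a.length : Int) - (b.length : Int)
      ≤ (PySem.List.pyGet? (pvLevLoop b a 1 (PySem.List.pyRange 0 ((b.length : Int) + 1))) (b.length : Int)).getD 0 := by
  have harg : ((b.length : Int) + 1) = ((b.length + 1 : Nat) : Int) := by push_cast; ring
  have key : ∀ (R : List Int), R.length = b.length + 1 →
      (∀ (k : Nat) (hk : k < R.length), (1 : Int) - 1 - k ≤ R[k]) →
      (a.length : Int) - (b.length : Int) ≤ (PySem.List.pyGet? (pvLevLoop b a 1 R) (b.length : Int)).getD 0 := by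
    intro R hlen0 hbase
    have hfl : (pvLevLoop b a 1 R).length = b.length + 1 := pvLevLoop_length b a 1 R hlen0
    have hlt : b.length < (pvLevLoop b a 1 R).length := by omega
    have hge := pvLevLoop_ge b a 1 R hlen0 hbase b.length hlt
    have hget : PySem.List.pyGet? (pvLevLoop b a 1 R) (b.length : Int)
        = some ((pvLevLoop b a 1 R)[b.length]) := by
      rw [PySem.List.pyGet?_natCast, List.getElem?_eq_getElem hlt]
    rw [hget]
    simp only [Option.getD_some]
    omega
  apply key
  · simp only [harg, PySem.List.pyRange_zero_natCast]
    simp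
  · intro k hk
    simp only [harg, PySem.List.pyRange_zero_natCast] at hk ⊢
    simp only [List.getElem_map, List.getElem_range]
    omega

-- the DP value dominates the length difference, so A's length pre-filter is redundant
theorem pvLev_ge (s1 s2 : String) : |PySem.Str.len s1 - PySem.Str.len s2| ≤ pvLev s1 s2 := by
  rw [PySem.Str.len_eq, PySem.Str.len_eq, abs_le]
  unfold pvLev
  by_cases hc : s1.toList.length < s2.toList.length
  · simp only [if_pos hc]
    have := pvLev_core_ge s2.toList s1.toList
    constructor <;> omega
  · simp only [if_neg hc]
    have := pvLev_core_ge s1.toList s2.toList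
    constructor <;> omega

-- insert at the front when x goes before every element
theorem pv_insertBy_front {α : Type} (before : α → α → Bool) (x : α) (ys : List α)
    (h : ∀ y ∈ ys, before x y = true) : PySem.List.insertBy before x ys = x :: ys := by
  cases ys with
  | nil => rfl
  | cons y ys => simp [PySem.List.insertBy, h y (by simp)]

-- filtering commutes with stable insertion into a key-sorted list
theorem pv_filter_insertBy {α : Type} (key : α → Int) (p : α → Bool) (x : α) :
    ∀ (ys : List α), ys.Pairwise (fun a b => key a ≤ key b) →
    (PySem.List.insertBy (fun a b => decide (key a < key b)) x ys).filter p
      = if p x then PySem.List.insertBy (fun a b => decide (key a < key b)) x (ys.filter p)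
        else ys.filter p := by
  intro ys
  induction ys with
  | nil => intro _; cases hpx : p x <;> simp [PySem.List.insertBy, List.filter, hpx]
  | cons y ys ih =>
    intro hpw
    rw [List.pairwise_cons] at hpw
    obtain ⟨hy, hys⟩ := hpw
    by_cases hlt : key x < key y
    · have hfront : ∀ z ∈ ys.filter p, (fun a b => decide (key a < key b)) x z = true := by
        intro z hz
        have hz' := List.mem_of_mem_filter hz
        simp only [decide_eq_true_eq]
        exact lt_of_lt_of_le hlt (hy z hz')
      have hins : PySem.List.insertBy (fun a b => decide (key a < key b)) x (y :: ys) = x :: y :: ys := by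
        simp [PySem.List.insertBy, hlt]
      have hfr := pv_insertBy_front (fun a b => decide (key a < key b)) x (ys.filter p) hfront
      cases hpx : p x <;> cases hpy : p y <;>
        simp [hpx, hpy, hfr, PySem.List.insertBy, hlt]
    · have hstep : PySem.List.insertBy (fun a b => decide (key a < key b)) x (y :: ys)
          = y :: PySem.List.insertBy (fun a b => decide (key a < key b)) x ys := by
        simp [PySem.List.insertBy, hlt]
      rw [hstep]
      cases hpx : p x <;> cases hpy : p y <;>
        simp [hpx, hpy, ih hys, PySem.List.insertBy, hlt]

theorem pv_sorted_append_singleton {α : Type} (key : α → Int) (xs : List α) (x : α) :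
    PySem.List.sorted (xs ++ [x]) key
      = PySem.List.insertBy (fun a b => decide (key a < key b)) x (PySem.List.sorted xs key) := by
  rw [PySem.List.sorted_eq_foldl_insertBy, PySem.List.sorted_eq_foldl_insertBy, List.foldl_append]
  rfl

-- filtering commutes with the stable sort
theorem pv_filter_sorted {α : Type} (key : α → Int) (p : α → Bool) (xs : List α) :
    (PySem.List.sorted xs key).filter p = PySem.List.sorted (xs.filter p) key := by
  induction xs using List.reverseRecOn with
  | nil => simp [PySem.List.sorted]
  | append_singleton xs x ih =>
    rw [pv_sorted_append_singleton, pv_filter_insertBy key p x _ (PySem.List.sorted_pairwise xs key),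
      List.filter_append]
    cases hpx : p x <;>
      simp [List.filter, hpx, ih, pv_sorted_append_singleton]

theorem pv_map_slice {α β : Type} (g : α → β) (xs : List α) (b : Int) :
    (PySem.List.slice xs none (some b)).map g = PySem.List.slice (xs.map g) none (some b) := by
  simp [PySem.List.slice, List.map_take]

-- ===== VERDICT (by name: the statement is the Claim_ definition above) =====
theorem sugerir_correcoes_otimizado_spec : Claim_equal_sugerir_correcoes_otimizado := by
  intro palavra dicionario limite minimo_sugestoes _
  unfold Spec_sugerir_correcoes_otimizado
  simp only [sugerir_correcoes_otimizado, sugerir_correcoes_otimizado_alt]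
  have hbody : (fun (acc : List (String × Int)) (termo : String) =>
        let dist := pvLev palavra termo
        if dist ≤ limite then acc ++ [(termo, dist)] else acc)
      = (fun acc termo =>
        if (fun t => decide (pvLev palavra t ≤ limite)) termo = true
        then acc ++ [(fun t => (t, pvLev palavra t)) termo] else acc) := by
    funext acc termo
    by_cases hle : pvLev palavra termo ≤ limite <;> simp [hle]
  rw [hbody, PySem.List.foldl_append_if (fun t => decide (pvLev palavra t ≤ limite))
    (fun t => (t, pvLev palavra t)) _ [], List.nil_append]
  have hff : List.filter (fun t => decide (pvLev palavra t ≤ limite))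
        (List.filter (fun termo => decide (|PySem.Str.len termo - PySem.Str.len palavra| ≤ limite)) dicionario)
      = List.filter (fun t => decide (pvLev palavra t ≤ limite)) dicionario := by
    rw [List.filter_filter]
    apply List.filter_congr
    intro t _
    by_cases hle : pvLev palavra t ≤ limite
    · have habs : |PySem.Str.len t - PySem.Str.len palavra| ≤ limite := by
        rw [abs_sub_comm]
        exact le_trans (pvLev_ge palavra t) hle
      have habs' : |(t.length : Int) - (palavra.length : Int)| ≤ limite := by
        simpa [PySem.Str.len_eq] using habs
      simp [hle, habs']
    · simp [hle]
  have hmf : List.map (fun t => (t, pvLev palavra t))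
        (List.filter (fun t => decide (pvLev palavra t ≤ limite)) dicionario)
      = List.filter (fun x : String × Int => decide (x.2 ≤ limite))
        (List.map (fun t => (t, pvLev palavra t)) dicionario) := by
    rw [List.filter_map]
    rfl
  rw [hff, hmf, pv_filter_sorted]
  -- abbreviations: R = the one full ranking, L = its within-limit prefix selection
  set R := PySem.List.sorted (List.map (fun t => (t, pvLev palavra t)) dicionario) (fun x => x.2) with hRdef
  set L := PySem.List.sorted (List.filter (fun x : String × Int => decide (x.2 ≤ limite))
    (List.map (fun t => (t, pvLev palavra t)) dicionario)) (fun x => x.2) with hLdef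
  simp only [List.length_map]
  by_cases hc : (L.length : Int) < minimo_sugestoes
  · rw [if_pos hc, if_neg (by omega)]
    have h0k : (0 : Int) ≤ minimo_sugestoes - (L.length : Int) := by omega
    have h0m : (0 : Int) ≤ minimo_sugestoes := by omega
    rw [PySem.List.slice_to _ h0k, PySem.List.slice_to _ h0m,
      List.take_of_length_le (by
        simp only [List.length_append, List.length_take]
        omega),
      List.map_append]
  · rw [if_neg hc, if_pos (by omega)]
    exact pv_map_slice (fun s => s.1) L minimo_sugestoes
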